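-- pv_equiv track=rewrite | github.com/IITA-Proyectos/rcj-2026-rescue-line-iita-salta-robocup | software/raspberry/test/rescue_zone_test/rescatemodelonos.py | select_target_from_list
-- ===== SOURCE A (Python) =====
-- def select_target_from_list(boxes):
--     targets = {'plateado': [], 'negro': [], 'rojo_verde': [], 'otros': []}
--     for d in boxes:
--         cls_id = d['cls']
--         if cls_id == 3:
--             targets['plateado'].append(d)
--         elif cls_id == 2:
--             targets['negro'].append(d)
--         elif cls_id in (4,5):
--             targets['rojo_verde'].append(d)
--         else:
--             targets['otros'].append(d)
--
--     for k in ('plateado','rojo_verde','negro','otros'):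
--         if targets[k]:
--             return targets[k][0]
--     return None
-- ===== SOURCE B (Python) =====
-- def select_target_from_list(boxes):
--     best = None
--     best_rank = 4
--     for d in boxes:
--         c = d['cls']
--         rank = 0 if c == 3 else 1 if c in (4, 5) else 2 if c == 2 else 3
--         if rank < best_rank:
--             best, best_rank = d, rank
--     return best
-- ===== Notes on version B (the rewrite author's own statement) =====
-- stated objective: simpler
-- what changed: Instead of partitioning boxes into four category lists and then scanning the categories in priority order, B maps each cls to a numeric rank and keeps the single best (lowest-rank, earliest) box in one pass with O(1) extra state.
import Mathlib
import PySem

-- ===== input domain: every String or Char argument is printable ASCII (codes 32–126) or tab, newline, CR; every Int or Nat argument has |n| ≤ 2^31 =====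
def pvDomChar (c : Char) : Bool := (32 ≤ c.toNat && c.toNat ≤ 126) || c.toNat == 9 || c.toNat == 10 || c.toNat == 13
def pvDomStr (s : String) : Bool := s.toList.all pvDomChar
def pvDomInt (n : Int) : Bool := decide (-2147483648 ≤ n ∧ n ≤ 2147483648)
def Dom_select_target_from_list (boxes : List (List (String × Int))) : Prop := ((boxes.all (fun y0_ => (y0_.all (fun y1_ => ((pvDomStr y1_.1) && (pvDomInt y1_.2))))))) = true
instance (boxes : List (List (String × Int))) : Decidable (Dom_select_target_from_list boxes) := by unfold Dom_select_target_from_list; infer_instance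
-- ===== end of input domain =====

-- B replaces A's four category buckets with a single-pass best-so-far scan keyed by a numeric rank (return value only; neither mutates).

-- d['cls'] on an association list: first match (Python dicts have unique keys)
def pvGetCls (d : List (String × Int)) : Option Int :=
  (d.find? (fun kv => kv.1 == "cls")).map (·.2)

-- ===== PORT A =====
-- A's loop state: the four lists targets['plateado'], targets['negro'], targets['rojo_verde'], targets['otros'].
def stepA (acc : List (List (String × Int)) × List (List (String × Int)) × List (List (String × Int)) × List (List (String × Int)))
    (d : List (String × Int)) :
    List (List (String × Int)) × List (List (String × Int)) × List (List (String × Int)) × List (List (String × Int)) :=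
  match acc with
  | (p, n, rv, o) =>
    match pvGetCls d with
    | some cls_id =>
      if cls_id = 3 then (p ++ [d], n, rv, o)
      else if cls_id = 2 then (p, n ++ [d], rv, o)
      else if cls_id = 4 ∨ cls_id = 5 then (p, n, rv ++ [d], o)
      else (p, n, rv, o ++ [d])
    | none => (p, n, rv, o ++ [d])   -- d['cls'] raises KeyError in Python: excluded by Pre_

def select_target_from_list (boxes : List (List (String × Int))) : Option (List (String × Int)) :=
  match boxes.foldl stepA ([], [], [], []) with
  | (p, n, rv, o) =>
    match p with
    | x :: _ => some x
    | [] =>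
      match rv with
      | x :: _ => some x
      | [] =>
        match n with
        | x :: _ => some x
        | [] =>
          match o with
          | x :: _ => some x
          | [] => none

-- ===== PORT B =====
def pvRank (c : Int) : Int :=
  if c = 3 then 0 else if c = 4 ∨ c = 5 then 1 else if c = 2 then 2 else 3

def stepB (st : Option (List (String × Int)) × Int) (d : List (String × Int)) :
    Option (List (String × Int)) × Int :=
  match pvGetCls d with
  | some c => if pvRank c < st.2 then (some d, pvRank c) else st
  | none => if 3 < st.2 then (some d, 3) else st   -- d['cls'] raises KeyError in Python: excluded by Pre_

def select_target_from_list_alt (boxes : List (List (String × Int))) : Option (List (String × Int)) :=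
  (boxes.foldl stepB (none, 4)).1

-- ===== PRECONDITION & SPEC =====
-- Pre_ excludes exactly the inputs where some box lacks a 'cls' key, on which Python A (and B) raises KeyError.
def Pre_select_target_from_list (boxes : List (List (String × Int))) : Prop :=
  ∀ d ∈ boxes, (pvGetCls d).isSome = true
instance (boxes : List (List (String × Int))) : Decidable (Pre_select_target_from_list boxes) := by unfold Pre_select_target_from_list; infer_instance
def pvWitness_select_target_from_list : (List (List (String × Int))) := ([[("cls", 2)], [("cls", 4)]])
def Spec_select_target_from_list (boxes : List (List (String × Int))) (out : Option (List (String × Int))) : Prop := out = select_target_from_list_alt boxes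
instance (boxes : List (List (String × Int))) (out : Option (List (String × Int))) : Decidable (Spec_select_target_from_list boxes out) := by unfold Spec_select_target_from_list; infer_instance

-- ===== CLAIM (what is proved, stated in full; the proofs are below) =====
def Claim_equal_select_target_from_list : Prop := ∀ (boxes : List (List (String × Int))), Dom_select_target_from_list boxes → Pre_select_target_from_list boxes → Spec_select_target_from_list boxes (select_target_from_list boxes)

-- ===== LEMMAS AND PROOFS =====

-- A's final priority scan as a function of the four buckets.
def finishA (acc : List (List (String × Int)) × List (List (String × Int)) × List (List (String × Int)) × List (List (String × Int))) :
    Option (List (String × Int)) :=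
  match acc with
  | (p, n, rv, o) =>
    match p with
    | x :: _ => some x
    | [] =>
      match rv with
      | x :: _ => some x
      | [] =>
        match n with
        | x :: _ => some x
        | [] =>
          match o with
          | x :: _ => some x
          | [] => none

-- the rank of the first nonempty bucket (4 if all empty)
def minRank (acc : List (List (String × Int)) × List (List (String × Int)) × List (List (String × Int)) × List (List (String × Int))) : Int :=
  match acc with
  | (p, n, rv, o) =>
    if p ≠ [] then 0 else if rv ≠ [] then 1 else if n ≠ [] then 2 else if o ≠ [] then 3 else 4

set_option maxHeartbeats 2000000 in
-- Loop invariant: B's tracked (best, rank) is A's would-be answer and the rank of its bucket.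
lemma loop_eq : ∀ (rest : List (List (String × Int)))
    (p n rv o : List (List (String × Int))),
    finishA (List.foldl stepA (p, n, rv, o) rest)
      = (List.foldl stepB (finishA (p, n, rv, o), minRank (p, n, rv, o)) rest).1 := by
  intro rest
  induction rest with
  | nil => intro p n rv o; rfl
  | cons d rest ih =>
    intro p n rv o
    simp only [List.foldl_cons]
    have key : stepB (finishA (p, n, rv, o), minRank (p, n, rv, o)) d
        = (finishA (stepA (p, n, rv, o) d), minRank (stepA (p, n, rv, o) d)) := by
      simp only [stepA, stepB]
      rcases h : pvGetCls d with _ | c <;>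
        simp only [pvRank] <;>
        split_ifs <;>
        rcases p with _ | ⟨x, p⟩ <;> rcases rv with _ | ⟨y, rv⟩ <;>
        rcases n with _ | ⟨z, n⟩ <;> rcases o with _ | ⟨w, o⟩ <;>
        simp_all [finishA, minRank]
    rw [key]
    exact ih _ _ _ _

theorem select_target_from_list_spec : Claim_equal_select_target_from_list := by
  intro boxes _ _
  unfold Spec_select_target_from_list select_target_from_list select_target_from_list_alt
  have := loop_eq boxes [] [] [] []
  simpa [finishA, minRank] using this
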